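-- pv_equiv track=rewrite | github.com/DarkEmperor75/Container_Storage | Block_Formation.py | allocate_stacks
-- ===== SOURCE A (Python) =====
-- import math
--
-- def allocate_stacks(categories, stack_height=4, max_bays=5, max_rows=5):
--     """
--     Allocates stacks for container categories within a block.
--
--     Parameters:
--         categories (dict): Dictionary mapping category names to number of containers.
--                            e.g., {'Cat1': 23, 'Cat2': 30, ...}
--         stack_height (int): Maximum number of containers per stack.
--         max_bays (int): Maximum number of bays in the block.
--         max_rows (int): Maximum number of rows per bay.
--
--     Returns:
--         allocation (dict): Dictionary mapping each category to a list of stack positions.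
--                            Each position is a tuple (bay, row).
--     """
--     allocation = {}
--     current_bay = 1
--     current_row = 1
--
--     # Iterate through each category in the order provided (order matters)
--     for category, num_containers in categories.items():
--         stacks_needed = math.ceil(num_containers / stack_height)
--         allocation[category] = []  # Initialize the list for this category
--
--         for i in range(stacks_needed):
--             # Check if we have exceeded the block dimensions
--             if current_bay > max_bays:
--                 raise Exception("Not enough bays in the block to allocate all stacks.")
--
--             # Append the current position for the new stack
--             allocation[category].append((current_bay, current_row))
--
--             # Move to the next row in the current bay
--             current_row += 1
--
--             # If current row exceeds max_rows, reset to first row and increment bay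
--             if current_row > max_rows:
--                 current_row = 1
--                 current_bay += 1
--
--     return allocation
-- ===== SOURCE B (Python) =====
-- import math
--
-- def allocate_stacks(categories, stack_height=4, max_bays=5, max_rows=5):
--     """Index-first allocation: count the stacks each category needs, check the
--     block capacity once, lay out all stack positions by a div/mod formula, and
--     hand each category its consecutive slice."""
--     counts = [(category, math.ceil(num / stack_height))
--               for category, num in categories.items()]
--     total = sum(s for _, s in counts)
--     if total > max_bays * max_rows:
--         raise Exception("Not enough bays in the block to allocate all stacks.")
--     positions = [(i // max_rows + 1, i % max_rows + 1) for i in range(total)]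
--     allocation = {}
--     offset = 0
--     for category, s in counts:
--         allocation[category] = positions[offset:offset + s]
--         offset += s
--     return allocation
-- ===== Notes on version B (the rewrite author's own statement) =====
-- stated objective: alternative
-- what changed: Replaces A's live cursor loop (current_bay/current_row mutated per stack with a reset branch and an in-loop raise) by an index-first decomposition: per-category stack counts are computed up front, one capacity check replaces the in-loop raise, the flat position sequence is generated by closed-form div/mod, and each category receives its consecutive slice; Pre_ excludes the degenerate corners outside the task's natural domain (mixed-sign stack counts, max_rows <= 0 with stacks to place, demand beyond capacity), where A's returned values are accidents of its cursor arithmetic.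
-- outside the precondition, e.g. on allocate_stacks({'a': 1}, 4, 5, 0): A returns {'a': [(1, 1)]}, B raises Exception; on allocate_stacks({'a': 0}, 4, -1, 5): A returns {'a': []}, B raises Exception
import Mathlib
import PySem

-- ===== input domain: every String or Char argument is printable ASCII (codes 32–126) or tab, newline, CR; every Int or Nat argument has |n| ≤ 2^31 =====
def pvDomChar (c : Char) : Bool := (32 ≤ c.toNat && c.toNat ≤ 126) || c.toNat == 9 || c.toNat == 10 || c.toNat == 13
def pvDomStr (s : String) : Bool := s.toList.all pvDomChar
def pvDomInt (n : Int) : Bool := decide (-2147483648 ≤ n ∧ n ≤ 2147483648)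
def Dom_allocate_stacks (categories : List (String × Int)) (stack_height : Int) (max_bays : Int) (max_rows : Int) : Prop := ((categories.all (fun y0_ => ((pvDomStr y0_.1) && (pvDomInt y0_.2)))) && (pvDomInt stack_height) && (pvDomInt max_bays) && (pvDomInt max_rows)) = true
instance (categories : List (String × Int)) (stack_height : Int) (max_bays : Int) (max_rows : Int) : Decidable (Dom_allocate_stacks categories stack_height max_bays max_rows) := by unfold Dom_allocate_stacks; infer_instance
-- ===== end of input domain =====

-- B replaces A's live (current_bay, current_row) cursor loop by per-category stack counts,
-- one up-front capacity check and closed-form div/mod positions handed out as slices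
-- (objective: alternative).

-- ===== PORT A =====
-- math.ceil(num / stack_height): on Dom (|int| ≤ 2^31) Python's float division followed by
-- math.ceil equals the exact integer ceiling -((-num) // stack_height).
def pyCeilDiv (num sh : Int) : Int := -(PySem.Int.floordiv (-num) sh)

-- body of A's inner `for i in range(stacks_needed)` loop (the loop variable i is unused);
-- state = (raised?, allocation, current_bay, current_row).  Where Python raises
-- Exception("Not enough bays …") the flag becomes true; Pre_ excludes those inputs.
def asInner (category : String) (max_bays max_rows : Int)
    (st : Bool × PySem.Dict String (List (Int × Int)) × Int × Int) :
    Bool × PySem.Dict String (List (Int × Int)) × Int × Int :=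
  let (err, alloc, bay, row) := st
  if err then (err, alloc, bay, row)
  else if bay > max_bays then (true, alloc, bay, row)
  else
    let alloc := alloc.modify category [] (· ++ [(bay, row)])
    let row' := row + 1
    if row' > max_rows then (err, alloc, bay + 1, 1) else (err, alloc, bay, row')

def allocate_stacks (categories : List (String × Int)) (stack_height : Int) (max_bays : Int) (max_rows : Int) : List (String × List (Int × Int)) :=
  let fin := ((PySem.Dict.ofList categories).items).foldl
    (fun st cn =>
      let stacks_needed := pyCeilDiv cn.2 stack_height
      let st1 := (st.1, st.2.1.insert cn.1 [], st.2.2)   -- allocation[category] = []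
      (PySem.List.pyRange 0 stacks_needed 1).foldl
        (fun st2 _i => asInner cn.1 max_bays max_rows st2) st1)
    (false, PySem.Dict.empty, 1, 1)
  fin.2.1.items

-- ===== PORT B =====
def allocate_stacks_alt (categories : List (String × Int)) (stack_height : Int) (max_bays : Int) (max_rows : Int) : List (String × List (Int × Int)) :=
  let counts := ((PySem.Dict.ofList categories).items).map
    (fun cn => (cn.1, pyCeilDiv cn.2 stack_height))
  let total := (counts.map (fun cs => cs.2)).sum
  -- Source B: if total > max_bays * max_rows: raise Exception(…) — excluded by Pre_
  let positions := (PySem.List.pyRange 0 total 1).map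
    (fun i => (PySem.Int.floordiv i max_rows + 1, PySem.Int.mod i max_rows + 1))
  let fin := counts.foldl
    (fun (st : PySem.Dict String (List (Int × Int)) × Int) p =>
      (st.1.insert p.1 (PySem.List.slice positions (some st.2) (some (st.2 + p.2))), st.2 + p.2))
    (PySem.Dict.empty, 0)
  fin.1.items

-- ===== PRECONDITION & SPEC =====
-- Pre_ admits inputs whose total stack demand fits the block capacity and whose per-category
-- stack counts ceil(num/stack_height) are either all ≥ 0 (the normal case, with max_rows ≥ 1)
-- or all ≤ 0 (nothing to place); it excludes inputs where A raises (ZeroDivisionError at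
-- stack_height = 0, its explicit Exception on overflow) and the degenerate corners outside the
-- task's natural domain (max_rows ≤ 0 with stacks to place, mixed-sign stack counts), where
-- A's returned values are accidents of its cursor arithmetic.
def Pre_allocate_stacks (categories : List (String × Int)) (stack_height : Int) (max_bays : Int) (max_rows : Int) : Prop :=
  (categories = [] ∨ stack_height ≠ 0) ∧
  (((PySem.Dict.ofList categories).items).map
      (fun cn => pyCeilDiv cn.2 stack_height)).sum ≤ max_bays * max_rows ∧
  ((1 ≤ max_rows ∧ ∀ cn ∈ categories, 0 ≤ pyCeilDiv cn.2 stack_height) ∨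
   (∀ cn ∈ categories, pyCeilDiv cn.2 stack_height ≤ 0))
instance (categories : List (String × Int)) (stack_height : Int) (max_bays : Int) (max_rows : Int) : Decidable (Pre_allocate_stacks categories stack_height max_bays max_rows) := by unfold Pre_allocate_stacks; infer_instance

def pvWitness_allocate_stacks : (List (String × Int)) × Int × Int × Int := ([("Cat1", 23), ("Cat2", 30)], 4, 5, 5)

def Spec_allocate_stacks (categories : List (String × Int)) (stack_height : Int) (max_bays : Int) (max_rows : Int) (out : List (String × List (Int × Int))) : Prop := out = allocate_stacks_alt categories stack_height max_bays max_rows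
instance (categories : List (String × Int)) (stack_height : Int) (max_bays : Int) (max_rows : Int) (out : List (String × List (Int × Int))) : Decidable (Spec_allocate_stacks categories stack_height max_bays max_rows out) := by unfold Spec_allocate_stacks; infer_instance

-- ===== CLAIM (what is proved, stated in full; the proofs are below) =====
def Claim_equal_allocate_stacks : Prop := ∀ (categories : List (String × Int)) (stack_height : Int) (max_bays : Int) (max_rows : Int), Dom_allocate_stacks categories stack_height max_bays max_rows → Pre_allocate_stacks categories stack_height max_bays max_rows → Spec_allocate_stacks categories stack_height max_bays max_rows (allocate_stacks categories stack_height max_bays max_rows)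

-- ===== LEMMAS AND PROOFS =====

-- every item of dict(l) is one of the pairs of l
theorem pvMem_items_foldl {κ ν : Type} [BEq κ] [LawfulBEq κ]
    (l : List (κ × ν)) : ∀ (d : PySem.Dict κ ν) (p : κ × ν),
    p ∈ (l.foldl (fun d kv => d.insert kv.1 kv.2) d).items → p ∈ d.items ∨ p ∈ l := by
  induction l with
  | nil => intro d p h; exact Or.inl h
  | cons kv l ih =>
    intro d p h
    rcases ih (d.insert kv.1 kv.2) p h with h1 | h1
    · rcases (PySem.Dict.mem_items_insert _ _ _ _).mp h1 with h2 | h2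
      · exact Or.inr (by simp [h2])
      · exact Or.inl h2.1
    · exact Or.inr (List.mem_cons_of_mem _ h1)

theorem pvMem_items_ofList {κ ν : Type} [BEq κ] [LawfulBEq κ]
    (l : List (κ × ν)) (p : κ × ν) (h : p ∈ (PySem.Dict.ofList l).items) : p ∈ l := by
  rcases pvMem_items_foldl l PySem.Dict.empty p h with h1 | h1
  · simp [PySem.Dict.empty] at h1
  · exact h1

-- the (bay, row) pair the cursor holds after i stacks have been placed
def pvPos (mr : Int) (i : Int) : Int × Int :=
  (PySem.Int.floordiv i mr + 1, PySem.Int.mod i mr + 1)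

-- the positions of stacks k, k+1, …, k+s-1
def pvChunk (mr : Int) (k s : Nat) : List (Int × Int) :=
  (List.range' k s).map (fun j : Nat => pvPos mr (j : Int))

theorem pvPos_zero (mr : Int) (hmr : 1 ≤ mr) : pvPos mr 0 = (1, 1) := by
  have hm : (0:Int) < mr := by omega
  simp [pvPos, PySem.Int.floordiv_eq_ediv_of_pos hm, PySem.Int.mod_eq_emod_of_pos hm]

theorem pvPos_step (mr : Int) (hmr : 1 ≤ mr) (k : Nat) :
    (if (pvPos mr k).2 + 1 > mr then ((pvPos mr k).1 + 1, (1 : Int))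
     else ((pvPos mr k).1, (pvPos mr k).2 + 1)) = pvPos mr ((k : Int) + 1) := by
  have hm : (0:Int) < mr := by omega
  simp only [pvPos, PySem.Int.floordiv_eq_ediv_of_pos hm, PySem.Int.mod_eq_emod_of_pos hm]
  have h0 : (0:Int) ≤ (k:Int) % mr := Int.emod_nonneg _ (by omega)
  have h1 : (k:Int) % mr < mr := Int.emod_lt_of_pos _ hm
  have h2 : mr * ((k:Int) / mr) + (k:Int) % mr = (k:Int) := Int.mul_ediv_add_emod _ _
  by_cases hc : (k:Int) % mr + 1 + 1 > mr
  · have hr : (k:Int) % mr = mr - 1 := by omega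
    have key : ((k:Int)+1) / mr = (k:Int)/mr + 1 ∧ ((k:Int)+1) % mr = 0 :=
      (Int.ediv_emod_unique hm).mpr ⟨by linarith, le_refl _, hm⟩
    rw [if_pos (by omega), key.1, key.2]
    norm_num
  · have hr : (k:Int) % mr + 1 < mr := by omega
    have key : ((k:Int)+1) / mr = (k:Int)/mr ∧ ((k:Int)+1) % mr = (k:Int) % mr + 1 :=
      (Int.ediv_emod_unique hm).mpr ⟨by linarith, by omega, hr⟩
    rw [if_neg (by omega), key.1, key.2]

theorem pvBay_le (mb mr : Int) (hmr : 1 ≤ mr) (k : Nat) (h : (k : Int) < mb * mr) :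
    (pvPos mr k).1 ≤ mb := by
  have hm : (0:Int) < mr := by omega
  simp only [pvPos, PySem.Int.floordiv_eq_ediv_of_pos hm]
  have hd : (k:Int) / mr < mb := by rw [Int.ediv_lt_iff_lt_mul hm]; linarith
  have h0 : (0:Int) ≤ (k:Int) / mr := Int.ediv_nonneg (by omega) (by omega)
  omega

theorem pvModify_insert_self {κ ν : Type} [BEq κ] [LawfulBEq κ]
    (d : PySem.Dict κ ν) (k : κ) (x d0 : ν) (f : ν → ν) :
    (d.insert k x).modify k d0 f = d.insert k (f x) := by
  simp [PySem.Dict.modify, PySem.Dict.getD_insert_self, PySem.Dict.insert_insert_self]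

theorem pvChunk_cons (mr : Int) (k s : Nat) :
    pvChunk mr k (s + 1) = pvPos mr (k : Int) :: pvChunk mr (k + 1) s := by
  simp [pvChunk, List.range'_succ]

theorem pvFoldl_pyRange_iterate {α : Type} (g : α → α) (t : Int) (init : α) :
    (PySem.List.pyRange 0 t 1).foldl (fun st _i => g st) init = g^[t.toNat] init := by
  rw [List.foldl_const, PySem.List.length_pyRange_one]
  norm_num

theorem pvSlice_positions (f : Int → Int × Int) (T : Int) (k s : Nat) (h : (k : Int) + s ≤ T) :
    PySem.List.slice ((PySem.List.pyRange 0 T 1).map f)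
      (some (k : Int)) (some ((k : Int) + (s : Int)))
      = (List.range' k s).map (fun j : Nat => f (j : Int)) := by
  rw [PySem.List.slice_natCast_add, PySem.List.pyRange_one]
  rw [List.map_map, ← List.map_drop, ← List.map_take]
  rw [List.range_eq_range', show (T - 0).toNat = k + ((T-0).toNat - k) by omega,
      ← List.range'_append (step := 1)]
  rw [List.drop_left' (by simp [List.length_range'] : (List.range' 0 k).length = k)]
  rw [show (T-0).toNat - k = s + ((T-0).toNat - k - s) by omega,
      ← List.range'_append (step := 1)]
  rw [List.take_left' (by simp [List.length_range'] : (List.range' (0 + 1 * k) s).length = s)]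
  simp [Function.comp_def]

theorem pvInner_loop (c : String) (mb mr : Int) (hmr : 1 ≤ mr) (s : Nat) :
    ∀ (k : Nat) (d : PySem.Dict String (List (Int × Int))) (xs : List (Int × Int)),
    (k : Int) + s ≤ mb * mr →
    (asInner c mb mr)^[s] (false, d.insert c xs, pvPos mr k)
      = (false, d.insert c (xs ++ pvChunk mr k s), pvPos mr ((k + s : Nat) : Int)) := by
  induction s with
  | zero => intro k d xs h; simp [pvChunk]
  | succ n ih =>
    intro k d xs h
    rw [Function.iterate_succ_apply]
    have hbay : (pvPos mr k).1 ≤ mb := pvBay_le mb mr hmr k (by push_cast at h; omega)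
    have hstep := pvPos_step mr hmr k
    have hone : asInner c mb mr (false, d.insert c xs, pvPos mr k)
        = (false, d.insert c (xs ++ [pvPos mr (k : Int)]), pvPos mr ((k : Int) + 1)) := by
      simp only [asInner]
      rw [if_neg (by simp), if_neg (by omega), ← hstep]
      rw [pvModify_insert_self]
      split_ifs with h1 <;> simp
    rw [hone]
    rw [show pvPos mr ((k:Int)+1) = pvPos mr ((k+1 : Nat) : Int) by push_cast; ring_nf]
    rw [ih (k+1) d (xs ++ [pvPos mr (k:Int)]) (by push_cast at h ⊢; omega)]
    rw [pvChunk_cons]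
    simp [show ((k+1+n : Nat) : Int) = ((k + (n+1) : Nat) : Int) by push_cast; ring]

-- the per-category stack counts as naturals
def pvSizes (sh : Int) (l : List (String × Int)) : List Nat :=
  l.map (fun cn => (pyCeilDiv cn.2 sh).toNat)

theorem pvSizes_sum_cast (sh : Int) (l : List (String × Int))
    (hpos : ∀ cn ∈ l, 0 ≤ pyCeilDiv cn.2 sh) :
    (l.map (fun cn => pyCeilDiv cn.2 sh)).sum = (((pvSizes sh l).sum : Nat) : Int) := by
  induction l with
  | nil => simp [pvSizes]
  | cons x l ih =>
    have hx := hpos x (by simp)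
    have ih' := ih (fun cn hcn => hpos cn (List.mem_cons_of_mem _ hcn))
    simp [pvSizes, List.map_cons] at ih' ⊢
    omega

theorem pvOuter (sh mb mr T : Int) (hmr : 1 ≤ mr) (hT : T ≤ mb * mr)
    (l : List (String × Int)) (hpos : ∀ cn ∈ l, 0 ≤ pyCeilDiv cn.2 sh) :
    ∀ (k : Nat) (d : PySem.Dict String (List (Int × Int))),
    (k : Int) + ((pvSizes sh l).sum : Int) ≤ T →
    (l.foldl
        (fun st cn =>
          let stacks_needed := pyCeilDiv cn.2 sh
          let st1 := (st.1, st.2.1.insert cn.1 [], st.2.2)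
          (PySem.List.pyRange 0 stacks_needed 1).foldl
            (fun st2 _i => asInner cn.1 mb mr st2) st1)
        (false, d, pvPos mr k)
      = (false,
         ((l.map (fun cn => (cn.1, pyCeilDiv cn.2 sh))).foldl
            (fun (st : PySem.Dict String (List (Int × Int)) × Int) p =>
              (st.1.insert p.1
                 (PySem.List.slice
                   ((PySem.List.pyRange 0 T 1).map
                     (fun i => (PySem.Int.floordiv i mr + 1, PySem.Int.mod i mr + 1)))
                   (some st.2) (some (st.2 + p.2))), st.2 + p.2))
            (d, (k : Int))).1,
         pvPos mr ((k + (pvSizes sh l).sum : Nat) : Int)))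
    ∧ ((l.map (fun cn => (cn.1, pyCeilDiv cn.2 sh))).foldl
            (fun (st : PySem.Dict String (List (Int × Int)) × Int) p =>
              (st.1.insert p.1
                 (PySem.List.slice
                   ((PySem.List.pyRange 0 T 1).map
                     (fun i => (PySem.Int.floordiv i mr + 1, PySem.Int.mod i mr + 1)))
                   (some st.2) (some (st.2 + p.2))), st.2 + p.2))
            (d, (k : Int))).2 = ((k + (pvSizes sh l).sum : Nat) : Int) := by
  induction l with
  | nil => intro k d h; simp [pvSizes]
  | cons cn l ih =>
    intro k d h
    have hcn := hpos cn (by simp)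
    have hpos' : ∀ c ∈ l, 0 ≤ pyCeilDiv c.2 sh := fun c hc => hpos c (List.mem_cons_of_mem _ hc)
    have hsz : ((pvSizes sh (cn :: l)).sum : Int)
        = ((pyCeilDiv cn.2 sh).toNat : Int) + ((pvSizes sh l).sum : Int) := by
      simp [pvSizes]
    set s := (pyCeilDiv cn.2 sh).toNat with hs
    have hnn : (0:Int) ≤ ((pvSizes sh l).sum : Int) := by positivity
    have hks : (k : Int) + (s : Int) ≤ T := by rw [hsz] at h; omega
    have hmax : pyCeilDiv cn.2 sh = ((s : Nat) : Int) := by rw [hs, Int.toNat_of_nonneg hcn]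
    have hIL := pvInner_loop cn.1 mb mr hmr s k d [] (by omega)
    rw [List.nil_append] at hIL
    have hB : PySem.List.slice
          ((PySem.List.pyRange 0 T 1).map
            (fun i => (PySem.Int.floordiv i mr + 1, PySem.Int.mod i mr + 1)))
          (some (k : Int)) (some ((k : Int) + pyCeilDiv cn.2 sh))
        = pvChunk mr k s := by
      rw [hmax, pvSlice_positions _ T k s hks]; rfl
    have hcast : (k:Int) + pyCeilDiv cn.2 sh = (((k + s : Nat)) : Int) := by
      rw [hmax]; push_cast; ring
    have hidx : (k + s + (pvSizes sh l).sum : Nat) = (k + (pvSizes sh (cn :: l)).sum : Nat) := by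
      simp [pvSizes, hs]; omega
    obtain ⟨ihA, ihB⟩ := ih hpos' (k + s) (d.insert cn.1 (pvChunk mr k s))
      (by rw [hsz] at h; push_cast at h ⊢; omega)
    constructor
    · rw [List.foldl_cons]
      simp only []
      rw [pvFoldl_pyRange_iterate, hIL]
      rw [List.map_cons, List.foldl_cons]
      simp only []
      rw [hB, hcast, ihA, hidx]
    · rw [List.map_cons, List.foldl_cons]
      simp only []
      rw [hB, hcast, ihB, hidx]

theorem pvPyRange_nonpos (s : Int) (h : s ≤ 0) : PySem.List.pyRange 0 s 1 = [] := by
  rw [PySem.List.pyRange_one]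
  have h0 : (s - 0).toNat = 0 := by omega
  rw [h0]
  simp

theorem pvSlice_nil {α : Type} (a b : Option Int) : PySem.List.slice ([] : List α) a b = [] := by
  cases a <;> cases b <;> simp [PySem.List.slice]

-- branch 2 of Pre_: every stack count is ≤ 0, so A's inner loops are empty and every
-- category receives []
theorem pvNonpos_A (sh mb mr : Int) (l : List (String × Int))
    (h : ∀ cn ∈ l, pyCeilDiv cn.2 sh ≤ 0) :
    ∀ (d : PySem.Dict String (List (Int × Int))) (bay row : Int),
    (l.foldl
        (fun st cn =>
          let stacks_needed := pyCeilDiv cn.2 sh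
          let st1 := (st.1, st.2.1.insert cn.1 [], st.2.2)
          (PySem.List.pyRange 0 stacks_needed 1).foldl
            (fun st2 _i => asInner cn.1 mb mr st2) st1)
        ((false : Bool), d, bay, row)
      = ((false : Bool), l.foldl (fun d cn => d.insert cn.1 []) d, bay, row)) := by
  induction l with
  | nil => intro d bay row; rfl
  | cons cn l ih =>
    intro d bay row
    rw [List.foldl_cons, List.foldl_cons]
    simp only []
    rw [pvPyRange_nonpos _ (h cn (by simp)), List.foldl_nil]
    exact ih (fun c hc => h c (List.mem_cons_of_mem _ hc)) _ _ _

theorem pvNonpos_B (positions : List (Int × Int)) (hpos : positions = [])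
    (counts : List (String × Int)) :
    ∀ (d : PySem.Dict String (List (Int × Int))) (off : Int),
    (counts.foldl
        (fun (st : PySem.Dict String (List (Int × Int)) × Int) p =>
          (st.1.insert p.1 (PySem.List.slice positions (some st.2) (some (st.2 + p.2))),
           st.2 + p.2))
        (d, off)).1
      = counts.foldl (fun d p => d.insert p.1 []) d := by
  subst hpos
  induction counts with
  | nil => intro d off; rfl
  | cons p counts ih =>
    intro d off
    rw [List.foldl_cons, List.foldl_cons]
    rw [pvSlice_nil (some off) (some (off + p.2))]
    exact ih _ _

theorem pvMapSum_nonpos {α : Type} (f : α → Int) (l : List α)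
    (h : ∀ x ∈ l, f x ≤ 0) : (l.map f).sum ≤ 0 := by
  induction l with
  | nil => simp
  | cons x l ih =>
    have h1 := h x (by simp)
    have h2 := ih (fun c hc => h c (List.mem_cons_of_mem _ hc))
    simp only [List.map_cons, List.sum_cons]
    omega

-- ===== VERDICT (by name: the statement is the Claim_ definition above) =====
theorem allocate_stacks_spec : Claim_equal_allocate_stacks := by
  intro categories sh mb mr _hDom hPre
  obtain ⟨_hsh, hcap, hbranch⟩ := hPre
  unfold Spec_allocate_stacks allocate_stacks allocate_stacks_alt
  simp only []
  set items := (PySem.Dict.ofList categories).items with hitems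
  set T := ((items.map (fun cn => (cn.1, pyCeilDiv cn.2 sh))).map (fun cs => cs.2)).sum with hTdef
  have hTe : T = (items.map (fun cn => pyCeilDiv cn.2 sh)).sum := by
    rw [hTdef, List.map_map]; rfl
  have hTcap : T ≤ mb * mr := by rw [hTe]; exact hcap
  rcases hbranch with hb | hcats
  · -- all stack counts ≥ 0 and max_rows ≥ 1: the index-first layout tracks A's cursor
    obtain ⟨hmr, hcats⟩ := hb
    have hpos : ∀ cn ∈ items, 0 ≤ pyCeilDiv cn.2 sh := fun cn hcn =>
      hcats cn (pvMem_items_ofList categories cn (hitems ▸ hcn))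
    have hsum : T = ((pvSizes sh items).sum : Nat) := by
      rw [hTe]; exact pvSizes_sum_cast sh items hpos
    have hmain := (pvOuter sh mb mr T hmr hTcap items hpos 0 PySem.Dict.empty
      (by rw [← hsum]; simp)).1
    simp only [Nat.cast_zero, Nat.zero_add] at hmain
    rw [pvPos_zero mr hmr] at hmain
    rw [hmain]
  · -- all stack counts ≤ 0: both sides give every category the empty list
    have hneg : ∀ cn ∈ items, pyCeilDiv cn.2 sh ≤ 0 := fun cn hcn =>
      hcats cn (pvMem_items_ofList categories cn (hitems ▸ hcn))
    have hTle : T ≤ 0 := by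
      rw [hTe]; exact pvMapSum_nonpos _ items hneg
    rw [pvNonpos_A sh mb mr items hneg PySem.Dict.empty 1 1]
    rw [pvNonpos_B _ (by rw [pvPyRange_nonpos T hTle]; rfl) _ PySem.Dict.empty 0]
    rw [List.foldl_map]
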